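-- pv_equiv track=rewrite | github.com/itrin9634/Algorithm-Study | 프로그래머스/unrated/135808. 과일 장수/과일 장수.py | solution
-- ===== SOURCE A (Python) =====
-- def solution(k, m, score):
--     answer = 0
--     score.sort(reverse = True)
--     length = len(score)
--     cnt = length // m  # 나오는 상자 갯수
--     idx = m - 1
--     for i in range(1, cnt + 1):
--         answer += (score[idx] * m)
--         idx += m
--
--     return answer
-- ===== SOURCE B (Python) =====
-- def solution(k, m, score):
--     # Bucket the scores by value once, then walk the distinct values from highest to
--     # lowest; a run of c equal values occupies descending positions seen..seen+c-1,
--     # and the number of box-minimum positions (one per full box of m) inside that run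
--     # is (seen+c)//m - seen//m, so each group contributes in O(1).
--     if m <= 0:
--         return 0  # no complete box of non-positive size
--     freq = {}
--     for v in score:
--         freq[v] = freq.get(v, 0) + 1
--     seen = 0
--     total = 0
--     for v in sorted(freq, reverse=True):
--         c = freq[v]
--         total += v * m * ((seen + c) // m - seen // m)
--         seen += c
--     return total
-- ===== Notes on version B (the rewrite author's own statement) =====
-- stated objective: alternative
-- what changed: B buckets the scores into a frequency dict and walks the distinct values descending, adding each value group's contribution in O(1) via the box-minimum count (seen+c)//m - seen//m, instead of A's full descending sort plus a per-box stride loop over element positions; B also does not mutate the input list (A sorts it in place) and returns 0 for m <= 0, where A raises ZeroDivisionError at m == 0 (excluded by Pre_).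
import Mathlib
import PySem

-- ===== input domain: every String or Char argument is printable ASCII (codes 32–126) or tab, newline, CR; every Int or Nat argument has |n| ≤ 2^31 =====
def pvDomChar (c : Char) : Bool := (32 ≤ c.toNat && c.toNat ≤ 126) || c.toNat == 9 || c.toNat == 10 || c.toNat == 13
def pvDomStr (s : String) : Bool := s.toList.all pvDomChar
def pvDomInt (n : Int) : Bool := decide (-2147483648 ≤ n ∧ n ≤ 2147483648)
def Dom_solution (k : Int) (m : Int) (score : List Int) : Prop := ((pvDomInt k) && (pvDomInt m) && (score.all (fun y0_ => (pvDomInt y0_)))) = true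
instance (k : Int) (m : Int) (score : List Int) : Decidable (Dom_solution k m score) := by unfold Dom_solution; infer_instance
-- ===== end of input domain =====

-- B buckets the scores into a frequency dict and walks the distinct values descending,
-- adding each group's contribution in one arithmetic step, instead of A's full descending
-- sort with a per-box stride loop; equivalence is about the RETURN value only (A sorts
-- `score` in place, B does not mutate it).

-- ===== PORT A =====
def solution (k : Int) (m : Int) (score : List Int) : Int :=
  let s := PySem.List.sorted score (fun x => x) true
  let length : Int := s.length
  let cnt := PySem.Int.floordiv length m
  let st := (PySem.List.pyRange 1 (cnt + 1) 1).foldl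
      (fun (p : Int × Int) _i => (p.1 + PySem.List.pyGetD s p.2 0 * m, p.2 + m)) (0, m - 1)
  st.1

-- ===== PORT B =====
def solution_alt (k : Int) (m : Int) (score : List Int) : Int :=
  if m ≤ 0 then 0
  else
    let freq := score.foldl (fun d x => d.insert x (d.getD x 0 + 1)) PySem.Dict.empty
    let st := (PySem.List.sorted freq.keys (fun x => x) true).foldl
        (fun (p : Int × Int) v =>
          let c := freq.getD v 0
          (p.1 + v * m * (PySem.Int.floordiv (p.2 + c) m - PySem.Int.floordiv p.2 m),
           p.2 + c))
        (0, 0)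
    st.1

-- ===== PRECONDITION & SPEC =====
-- Pre_ excludes exactly m = 0, where A raises ZeroDivisionError on `len(score) // m`.
def Pre_solution (k : Int) (m : Int) (score : List Int) : Prop := m ≠ 0
instance (k : Int) (m : Int) (score : List Int) : Decidable (Pre_solution k m score) := by
  unfold Pre_solution; infer_instance
def pvWitness_solution : Int × Int × List Int := (4, 3, [1, 2, 3, 1, 2, 3, 1])

def Spec_solution (k : Int) (m : Int) (score : List Int) (out : Int) : Prop :=
  out = solution_alt k m score
instance (k : Int) (m : Int) (score : List Int) (out : Int) : Decidable (Spec_solution k m score out) := by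
  unfold Spec_solution; infer_instance

-- ===== CLAIM (what is proved, stated in full; the proofs are below) =====
def Claim_equal_solution : Prop := ∀ (k : Int) (m : Int) (score : List Int),
  Dom_solution k m score → Pre_solution k m score → Spec_solution k m score (solution k m score)

-- ===== LEMMAS AND PROOFS =====

-- A's loop over range(1, c+1): the state (answer, idx) after the loop, as a sum.
lemma foldA (s : List Int) (m a j : Int) (c : Nat) :
    (PySem.List.pyRange 1 ((c : Int) + 1) 1).foldl
      (fun (p : Int × Int) _i => (p.1 + PySem.List.pyGetD s p.2 0 * m, p.2 + m)) (a, j)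
    = (a + ∑ i ∈ Finset.range c, PySem.List.pyGetD s (j + (i : Int) * m) 0 * m,
       j + (c : Int) * m) := by
  induction c with
  | zero => simp [PySem.List.pyRange_one_eq_nil (le_refl (1 : Int))]
  | succ c ih =>
    have hcast : (((c + 1 : Nat)) : Int) + 1 = ((c : Int) + 1) + 1 := by push_cast; ring
    rw [hcast, PySem.List.pyRange_one_succ_right (by omega : (1 : Int) ≤ (c : Int) + 1),
      List.foldl_append, ih]
    simp only [List.foldl_cons, List.foldl_nil, Prod.mk.injEq]
    constructor
    · rw [Finset.sum_range_succ]; ring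
    · push_cast; ring

-- m < 0: A's loop is empty (cnt ≤ 0), so A returns 0.
lemma solution_of_neg (k m : Int) (score : List Int) (hm : m < 0) : solution k m score = 0 := by
  have h := PySem.Int.floordiv_mul_add_mod ((PySem.List.sorted score (fun x => x) true).length : Int) m
  have hb := PySem.Int.mod_neg_bounds ((PySem.List.sorted score (fun x => x) true).length : Int) hm
  have hlen : (0 : Int) ≤ ((PySem.List.sorted score (fun x => x) true).length : Int) := by
    exact_mod_cast Int.natCast_nonneg _
  have hcnt : PySem.Int.floordiv ((PySem.List.sorted score (fun x => x) true).length : Int) m ≤ 0 := by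
    by_contra hpos
    rw [not_le] at hpos
    have h2 : PySem.Int.floordiv ((PySem.List.sorted score (fun x => x) true).length : Int) m * m
        ≤ 1 * m := mul_le_mul_of_nonpos_right (by omega) (le_of_lt hm)
    rw [one_mul] at h2
    linarith [hb.1, hb.2]
  simp only [solution]
  rw [PySem.List.pyRange_one_eq_nil (by omega)]
  simp

-- The sum of the entries of l sitting at box-minimum positions: positions j (0-based,
-- after `seen` earlier elements) with (seen + j + 1) divisible by M.
def bsum (M seen : Nat) (l : List Int) : Int :=
  ∑ j ∈ Finset.range l.length, if (seen + j + 1) % M = 0 then l.getD j 0 else 0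

lemma bsum_append (M seen : Nat) (xs ys : List Int) :
    bsum M seen (xs ++ ys) = bsum M seen xs + bsum M (seen + xs.length) ys := by
  unfold bsum
  rw [List.length_append, Finset.sum_range_add]
  congr 1
  · exact Finset.sum_congr rfl (fun j hj => by
      rw [Finset.mem_range] at hj
      rw [List.getD_append xs ys 0 j hj])
  · exact Finset.sum_congr rfl (fun j _ => by
      rw [List.getD_append_right xs ys 0 (xs.length + j) (Nat.le_add_right _ _),
        Nat.add_sub_cancel_left,
        show seen + (xs.length + j) + 1 = seen + xs.length + j + 1 by omega])

lemma bsum_replicate (M seen : Nat) (hM : 0 < M) (c : Nat) (v : Int) :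
    bsum M seen (List.replicate c v) = v * (((seen + c) / M - seen / M : Nat) : Int) := by
  induction c with
  | zero => simp [bsum]
  | succ c ih =>
    unfold bsum at ih ⊢
    rw [List.length_replicate] at ih ⊢
    rw [Finset.sum_range_succ]
    have hcongr : ∀ j ∈ Finset.range c,
        (if (seen + j + 1) % M = 0 then (List.replicate (c + 1) v).getD j 0 else 0)
        = (if (seen + j + 1) % M = 0 then (List.replicate c v).getD j 0 else 0) := by
      intro j hj
      rw [Finset.mem_range] at hj
      rw [List.getD_replicate v hj, List.getD_replicate v (by omega)]
    rw [Finset.sum_congr rfl hcongr, ih,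
      List.getD_replicate v (by omega : c < c + 1),
      show seen + (c + 1) = (seen + c) + 1 by omega, Nat.succ_div]
    have hmono : seen / M ≤ (seen + c) / M := Nat.div_le_div_right (by omega)
    by_cases hd : M ∣ seen + c + 1
    · rw [if_pos hd, if_pos (Nat.dvd_iff_mod_eq_zero.mp hd)]
      push_cast [Nat.cast_sub hmono, Nat.cast_sub (by omega : seen / M ≤ (seen + c) / M + 1)]
      ring
    · rw [if_neg hd, if_neg (fun h => hd (Nat.dvd_iff_mod_eq_zero.mpr h))]
      simp

-- A's per-box sum over i < n / M equals the position-filtered sum bsum M 0.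
lemma stride_eq_bsum (M : Nat) (hM : 0 < M) (t : List Int) (n : Nat) :
    (∑ i ∈ Finset.range (n / M), t.getD (M - 1 + i * M) 0)
    = ∑ j ∈ Finset.range n, if (0 + j + 1) % M = 0 then t.getD j 0 else 0 := by
  induction n with
  | zero => simp [Nat.zero_div]
  | succ n ih =>
    rw [Finset.sum_range_succ, Nat.succ_div]
    by_cases hd : M ∣ n + 1
    · rw [if_pos hd,
        if_pos (show (0 + n + 1) % M = 0 by
          rw [Nat.zero_add]; exact Nat.dvd_iff_mod_eq_zero.mp hd)]
      obtain ⟨q, hq⟩ := hd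
      cases q with
      | zero => simp at hq
      | succ r =>
        have hq' : n + 1 = M * r + M := by rw [hq]; ring
        have hn : n = M * r + (M - 1) := by omega
        have hnd : n / M = r := by
          rw [hn, Nat.mul_add_div hM, Nat.div_eq_of_lt (by omega), Nat.add_zero]
        have hidx : M - 1 + r * M = n := by rw [mul_comm]; omega
        rw [Finset.sum_range_succ, ih, hnd, hidx]
    · rw [if_neg hd,
        if_neg (show ¬(0 + n + 1) % M = 0 by
          rw [Nat.zero_add]; exact fun h => hd (Nat.dvd_iff_mod_eq_zero.mpr h)),
        Nat.add_zero, add_zero, ih]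

-- Counting each distinct value: the flatMap of replicates over a nodup key list has
-- count f a at a ∈ ks and 0 elsewhere.
lemma count_flatMap_replicate (ks : List Int) (hnd : ks.Nodup) (f : Int → Nat) (a : Int) :
    (ks.flatMap (fun v => List.replicate (f v) v)).count a
    = if a ∈ ks then f a else 0 := by
  induction ks with
  | nil => simp
  | cons v ks ih =>
    rw [List.flatMap_cons, List.count_append, List.count_replicate,
      ih (List.Nodup.of_cons hnd)]
    have hv : v ∉ ks := (List.nodup_cons.mp hnd).1
    by_cases hav : a = v
    · subst hav
      simp [hv]
    · simp [hav, Ne.symm hav]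

-- Expanding the descending distinct keys by their multiplicities is a permutation of score.
lemma expand_perm (score : List Int) (ks : List Int) (hnd : ks.Nodup)
    (hmem : ∀ a, a ∈ ks ↔ a ∈ score) :
    (ks.flatMap (fun v => List.replicate (score.count v) v)).Perm score := by
  rw [List.perm_iff_count]
  intro a
  rw [count_flatMap_replicate ks hnd _ a]
  by_cases ha : a ∈ ks
  · rw [if_pos ha]
  · rw [if_neg ha]
    exact (List.count_eq_zero.mpr (fun h => ha ((hmem a).mpr h))).symm

-- Expanding a descending key list gives a descending list.
lemma expand_pairwise (ks : List Int) (f : Int → Nat)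
    (hp : ks.Pairwise (fun a b => b ≤ a)) :
    (ks.flatMap (fun v => List.replicate (f v) v)).Pairwise (fun a b => b ≤ a) := by
  induction ks with
  | nil => simp
  | cons v ks ih =>
    rw [List.flatMap_cons, List.pairwise_append]
    refine ⟨List.pairwise_replicate.mpr (Or.inr le_rfl), ih (List.Pairwise.of_cons hp), ?_⟩
    intro x hx y hy
    rw [List.eq_of_mem_replicate hx]
    rw [List.mem_flatMap] at hy
    obtain ⟨w, hw, hyw⟩ := hy
    rw [List.eq_of_mem_replicate hyw]
    exact (List.pairwise_cons.mp hp).1 w hw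

-- The descending sort of score IS the expansion of its descending distinct keys.
lemma sorted_eq_expand (score : List Int) (ks : List Int) (hnd : ks.Nodup)
    (hmem : ∀ a, a ∈ ks ↔ a ∈ score) (hp : ks.Pairwise (fun a b => b ≤ a)) :
    PySem.List.sorted score (fun x => x) true
    = ks.flatMap (fun v => List.replicate (score.count v) v) := by
  apply PySem.List.eq_of_perm_of_pairwise_le_of_injective (fun x => -x) neg_injective
  · exact (PySem.List.sorted_perm score (fun x => x) true).trans
      (expand_perm score ks hnd hmem).symm
  · exact (PySem.List.sorted_pairwise_rev score (fun x => x)).imp (fun h => by omega)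
  · exact (expand_pairwise ks _ hp).imp (fun h => by omega)

-- B's loop over the key list: the running total is m times the bsum of the expansion.
lemma foldB (score : List Int) (M : Nat) (hM : 0 < M)
    (ks : List Int) (total : Int) (seen : Nat) :
    (ks.foldl
        (fun (p : Int × Int) v =>
          (p.1 + v * (M : Int) * (PySem.Int.floordiv (p.2 + (PySem.Dict.counter score).getD v 0) (M : Int)
              - PySem.Int.floordiv p.2 (M : Int)),
           p.2 + (PySem.Dict.counter score).getD v 0))
        (total, (seen : Int))).1
    = total + (M : Int) * bsum M seen (ks.flatMap (fun v => List.replicate (score.count v) v)) := by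
  induction ks generalizing total seen with
  | nil => simp [bsum]
  | cons v ks ih =>
    rw [List.foldl_cons]
    dsimp only
    rw [PySem.Dict.getD_counter score v,
      show (seen : Int) + (score.count v : Int) = ((seen + score.count v : Nat) : Int) by push_cast; ring]
    simp only [PySem.Int.floordiv_natCast]
    rw [ih, List.flatMap_cons, bsum_append, List.length_replicate,
      bsum_replicate M seen hM, Nat.cast_sub (Nat.div_le_div_right (Nat.le_add_right _ _))]
    push_cast
    ring

-- m > 0: both programs compute m times the sum of the box minima.
lemma solution_of_pos (k m : Int) (score : List Int) (hm : 0 < m) :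
    solution k m score = solution_alt k m score := by
  have hM1 : 1 ≤ m.toNat := by omega
  set M := m.toNat with hMdef
  have hmM : m = (M : Int) := by omega
  have hMpos : 0 < M := by omega
  set t := PySem.List.sorted score (fun x => x) true with ht
  set n := t.length with hn
  -- A side: the loop is the per-box stride sum, which is m * bsum M 0 t
  have hA : solution k m score = m * bsum M 0 t := by
    simp only [solution, ← ht, ← hn]
    rw [hmM, PySem.Int.floordiv_natCast, foldA]
    simp only [zero_add]
    have hterm : ∀ i ∈ Finset.range (n / M),
        PySem.List.pyGetD t ((M : Int) - 1 + (i : Int) * (M : Int)) 0 * (M : Int)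
        = t.getD (M - 1 + i * M) 0 * (M : Int) := by
      intro i _
      rw [show (M : Int) - 1 + (i : Int) * (M : Int) = ((M - 1 + i * M : Nat) : Int) by
        push_cast [Nat.cast_sub hM1]; ring, PySem.List.pyGetD_natCast]
    rw [Finset.sum_congr rfl hterm, ← Finset.sum_mul, stride_eq_bsum M hMpos t n]
    rw [← hmM]
    unfold bsum
    rw [← hn]
    ring
  -- B side
  have hB : solution_alt k m score = m * bsum M 0 t := by
    simp only [solution_alt, if_neg (not_le.mpr hm),
      PySem.Dict.foldl_insert_getD_add_one_eq_counter, PySem.Dict.keys_counter]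
    set ks := PySem.List.sorted (PySem.Set.ofList score) (fun x => x) true with hks
    have hksnd : ks.Nodup :=
      ((PySem.List.sorted_perm (PySem.Set.ofList score) (fun x => x) true).nodup_iff).mpr
        (PySem.Set.nodup_ofList score)
    have hksmem : ∀ a, a ∈ ks ↔ a ∈ score := by
      intro a
      rw [(PySem.List.sorted_perm (PySem.Set.ofList score) (fun x => x) true).mem_iff]
      exact PySem.Set.mem_ofList score a
    have hksp : ks.Pairwise (fun a b => b ≤ a) :=
      PySem.List.sorted_pairwise_rev (PySem.Set.ofList score) (fun x => x)
    have hfold := foldB score M hMpos ks 0 0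
    rw [Nat.cast_zero] at hfold
    rw [hmM, hfold, zero_add, ht, sorted_eq_expand score ks hksnd hksmem hksp]
  rw [hA, hB]

-- ===== VERDICT (by name: the statement is the Claim_ definition above) =====
theorem solution_spec : Claim_equal_solution := by
  intro k m score _ hpre
  unfold Spec_solution
  rcases lt_trichotomy m 0 with hm | hm | hm
  · rw [solution_of_neg k m score hm]
    simp only [solution_alt]
    rw [if_pos (le_of_lt hm)]
  · exact absurd hm hpre
  · exact solution_of_pos k m score hm
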